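-- pv_equiv track=rewrite | github.com/LuniumLuk/xfield-pytorch | xfield_train.py | generate_factors
-- ===== SOURCE A (Python) =====
-- def generate_factors(h, w):
--     temp = h
--     pad_y = [temp % 2]
--     while(temp != 1):
--         temp //= 2
--         pad_y.append(temp % 2)
--     del pad_y[-1]
--     pad_y.reverse()
--
--     temp = w
--     pad_x = [temp % 2]
--     while(temp != 1):
--         temp //= 2
--         pad_x.append(temp % 2)
--     del pad_x[-1]
--     pad_x.reverse()
--
--     len_x = len(pad_x)
--     len_y = len(pad_y)
--
--     up_x = [2] * len_x
--     up_y = [2] * len_y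
--
--     if(len_x > len_y):
--         pad_y.extend([0] * (len_x - len_y))
--         up_y.extend([1] * (len_x - len_y))
--
--     if(len_y > len_x):
--         pad_x.extend([0] * (len_y - len_x))
--         up_x.extend([1] * (len_y - len_x))
--
--     return pad_x, pad_y, up_x, up_y
-- ===== SOURCE B (Python) =====
-- def generate_factors(h, w):
--     # binary digits below the leading bit, most significant first
--     pad_y = [(h >> i) & 1 for i in range(h.bit_length() - 2, -1, -1)]
--     pad_x = [(w >> i) & 1 for i in range(w.bit_length() - 2, -1, -1)]
--     n = max(len(pad_x), len(pad_y))
--     up_x = [2] * len(pad_x) + [1] * (n - len(pad_x))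
--     up_y = [2] * len(pad_y) + [1] * (n - len(pad_y))
--     pad_x = pad_x + [0] * (n - len(pad_x))
--     pad_y = pad_y + [0] * (n - len(pad_y))
--     return pad_x, pad_y, up_x, up_y
-- ===== Notes on version B (the rewrite author's own statement) =====
-- stated objective: idiomatic
-- what changed: B reads each dimension's binary digits below the leading bit directly from the bit representation (bit_length and shifts, MSB-first) instead of A's repeated floor-halving loop with delete-last and reverse, and pads both lists to a common max length instead of two conditional extends.
import Mathlib
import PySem

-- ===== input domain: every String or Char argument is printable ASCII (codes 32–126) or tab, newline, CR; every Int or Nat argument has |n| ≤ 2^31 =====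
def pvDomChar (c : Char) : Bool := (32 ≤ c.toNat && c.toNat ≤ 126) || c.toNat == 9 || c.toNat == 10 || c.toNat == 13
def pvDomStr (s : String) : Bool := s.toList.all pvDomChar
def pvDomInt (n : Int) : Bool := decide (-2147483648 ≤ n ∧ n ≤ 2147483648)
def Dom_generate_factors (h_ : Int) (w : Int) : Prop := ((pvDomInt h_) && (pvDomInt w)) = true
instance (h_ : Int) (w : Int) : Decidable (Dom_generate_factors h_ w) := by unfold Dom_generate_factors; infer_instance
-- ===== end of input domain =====

-- B extracts each dimension's binary digits below the leading bit directly by shifting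
-- (bit_length), instead of A's repeated floor-halving loop with delete-last and reverse (idiomatic).

-- ===== PORT A =====
-- the while loop: appends (temp //= 2; temp % 2) while temp != 1; fuel 64 covers every |n| ≤ 2^31
def pvLoopA : Nat → Int → List Int → List Int
  | 0, _, acc => acc
  | f + 1, temp, acc =>
    if temp ≠ 1 then
      let t := PySem.Int.floordiv temp 2
      pvLoopA f t (acc ++ [PySem.Int.mod t 2])
    else acc

def pvPadA (x : Int) : List Int :=
  ((pvLoopA 64 x [PySem.Int.mod x 2]).dropLast).reverse

def generate_factors (h_ : Int) (w : Int) : List Int × List Int × List Int × List Int :=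
  let pad_y := pvPadA h_
  let pad_x := pvPadA w
  let len_x := pad_x.length
  let len_y := pad_y.length
  let up_x := List.replicate len_x (2 : Int)
  let up_y := List.replicate len_y (2 : Int)
  let pad_y := if len_x > len_y then pad_y ++ List.replicate (len_x - len_y) (0 : Int) else pad_y
  let up_y := if len_x > len_y then up_y ++ List.replicate (len_x - len_y) (1 : Int) else up_y
  let pad_x := if len_y > len_x then pad_x ++ List.replicate (len_y - len_x) (0 : Int) else pad_x
  let up_x := if len_y > len_x then up_x ++ List.replicate (len_y - len_x) (1 : Int) else up_x
  (pad_x, pad_y, up_x, up_y)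

-- ===== PORT B =====
-- [(x >> i) & 1 for i in range(x.bit_length() - 2, -1, -1)]
def pvBitsAlt (x : Int) : List Int :=
  (PySem.List.pyRange ((PySem.Int.bitLength x : Int) - 2) (-1) (-1)).map
    (fun i => PySem.Int.band (x >>> i.toNat) 1)

def generate_factors_alt (h_ : Int) (w : Int) : List Int × List Int × List Int × List Int :=
  let pad_y := pvBitsAlt h_
  let pad_x := pvBitsAlt w
  let n := max pad_x.length pad_y.length
  (pad_x ++ List.replicate (n - pad_x.length) (0 : Int),
   pad_y ++ List.replicate (n - pad_y.length) (0 : Int),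
   List.replicate pad_x.length (2 : Int) ++ List.replicate (n - pad_x.length) (1 : Int),
   List.replicate pad_y.length (2 : Int) ++ List.replicate (n - pad_y.length) (1 : Int))

-- ===== PRECONDITION & SPEC =====
-- Pre_ excludes h ≤ 0 or w ≤ 0, where A's while loop never terminates (temp //= 2 never reaches 1).
def Pre_generate_factors (h_ : Int) (w : Int) : Prop := 1 ≤ h_ ∧ 1 ≤ w
instance (h_ : Int) (w : Int) : Decidable (Pre_generate_factors h_ w) := by unfold Pre_generate_factors; infer_instance
def pvWitness_generate_factors : Int × Int := (6, 9)

def Spec_generate_factors (h_ : Int) (w : Int) (out : List Int × List Int × List Int × List Int) : Prop := out = generate_factors_alt h_ w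
instance (h_ : Int) (w : Int) (out : List Int × List Int × List Int × List Int) : Decidable (Spec_generate_factors h_ w out) := by unfold Spec_generate_factors; infer_instance

-- ===== CLAIM (what is proved, stated in full; the proofs are below) =====
def Claim_equal_generate_factors : Prop := ∀ (h_ : Int) (w : Int), Dom_generate_factors h_ w → Pre_generate_factors h_ w → Spec_generate_factors h_ w (generate_factors h_ w)

-- ===== LEMMAS AND PROOFS =====

-- reference form of the digit list (digits of n below the leading bit, MSB first)
def pvRef : Nat → List Int
  | n => if _h : n ≤ 1 then [] else pvRef (n / 2) ++ [((n % 2 : Nat) : Int)]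
decreasing_by exact Nat.div_lt_self (by omega) (by omega)

-- the suffix A's loop appends after the initial [x % 2]
def pvTail : Nat → List Int
  | n => if _h : n ≤ 1 then [] else ((n / 2 % 2 : Nat) : Int) :: pvTail (n / 2)
decreasing_by exact Nat.div_lt_self (by omega) (by omega)

theorem pvLoopA_spec (f : Nat) : ∀ (n : Nat), 0 < n → n < 2 ^ f → ∀ acc,
    pvLoopA f (n : Int) acc = acc ++ pvTail n := by
  induction f with
  | zero => intro n h1 h2; omega
  | succ f ih =>
    intro n h1 h2 acc
    by_cases hn : n = 1
    · subst hn
      simp [pvLoopA, pvTail]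
    · have h2' : 2 ≤ n := by omega
      have hne : (n : Int) ≠ 1 := by exact_mod_cast hn
      have hdiv : PySem.Int.floordiv (n : Int) 2 = ((n / 2 : Nat) : Int) :=
        PySem.Int.floordiv_natCast n 2
      have hmod : PySem.Int.mod ((n / 2 : Nat) : Int) 2 = ((n / 2 % 2 : Nat) : Int) :=
        PySem.Int.mod_natCast (n / 2) 2
      rw [show pvLoopA (f + 1) (n : Int) acc =
            pvLoopA f (PySem.Int.floordiv (n : Int) 2)
              (acc ++ [PySem.Int.mod (PySem.Int.floordiv (n : Int) 2) 2]) by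
            simp [pvLoopA, hne]]
      rw [hdiv, hmod]
      rw [ih (n / 2) (by omega) (by
        have hp : 2 ^ (f + 1) = 2 ^ f * 2 := by ring
        omega)]
      have ht : pvTail n = ((n / 2 % 2 : Nat) : Int) :: pvTail (n / 2) := by
        rw [pvTail]
        rw [dif_neg (by omega)]
      rw [ht]
      simp

theorem pvPad_eq_ref : ∀ (n : Nat), 0 < n →
    ((((n % 2 : Nat) : Int) :: pvTail n).dropLast).reverse = pvRef n := by
  intro n
  induction n using Nat.strong_induction_on with
  | _ n ih =>
    intro h1
    by_cases hn : n = 1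
    · subst hn; simp [pvTail, pvRef]
    · have h2 : 2 ≤ n := by omega
      have ht : pvTail n = ((n / 2 % 2 : Nat) : Int) :: pvTail (n / 2) := by
        rw [pvTail]
        rw [dif_neg (by omega)]
      have hr : pvRef n = pvRef (n / 2) ++ [((n % 2 : Nat) : Int)] := by
        conv_lhs => rw [pvRef]
        rw [dif_neg (by omega)]
      rw [ht, List.dropLast_cons₂, List.reverse_cons]
      rw [ih (n / 2) (Nat.div_lt_self (by omega) (by omega)) (by omega), hr]

-- pvRef as an explicit shift-indexed map
theorem pvRef_eq_map : ∀ (n : Nat), 0 < n →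
    pvRef n = (List.range (PySem.Int.bitLength (n : Int) - 1)).map
      (fun j => ((n >>> (PySem.Int.bitLength (n : Int) - 2 - j) % 2 : Nat) : Int)) := by
  intro n
  induction n using Nat.strong_induction_on with
  | _ n ih =>
    intro h1
    by_cases hn : n = 1
    · subst hn
      have : PySem.Int.bitLength (1 : Int) = 1 := by decide
      simp [pvRef, this]
    · have h2 : 2 ≤ n := by omega
      have hbl : PySem.Int.bitLength (n : Int) = PySem.Int.bitLength ((n / 2 : Nat) : Int) + 1 :=
        PySem.Int.bitLength_natCast (by omega)
      set k := PySem.Int.bitLength ((n / 2 : Nat) : Int) with hkdef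
      have hk1 : 1 ≤ k := by
        by_contra hc
        have hlt := PySem.Int.lt_two_pow_bitLength ((n / 2 : Nat) : Int)
        have hz : k = 0 := by omega
        rw [← hkdef, hz, pow_zero, Int.natAbs_natCast] at hlt
        omega
      have hr : pvRef n = pvRef (n / 2) ++ [((n % 2 : Nat) : Int)] := by
        conv_lhs => rw [pvRef]
        rw [dif_neg (by omega)]
      rw [hr, ih (n / 2) (Nat.div_lt_self (by omega) (by omega)) (by omega)]
      rw [hbl, ← hkdef]
      have hkk : k + 1 - 1 = k := by omega
      rw [hkk]
      have hrange : List.range k = List.range (k - 1) ++ [k - 1] := by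
        conv_lhs => rw [show k = (k - 1) + 1 by omega]
        rw [List.range_succ]
      rw [hrange, List.map_append]
      congr 1
      · apply List.map_congr_left
        intro j hj
        have hj' : j < k - 1 := List.mem_range.mp hj
        have hsub : k + 1 - 2 - j = (k - 2 - j) + 1 := by omega
        have hsub2 : k - 1 - j = k - 2 - j + 1 := by omega
        rw [hsub]
        congr 2
        rw [Nat.shiftRight_succ_inside]
      · simp only [List.map_cons, List.map_nil]
        have hz : k + 1 - 2 - (k - 1) = 0 := by omega
        rw [hz]
        rfl

-- pvBitsAlt computes pvRef
theorem pvBitsAlt_eq_ref (n : Nat) (h1 : 0 < n) : pvBitsAlt (n : Int) = pvRef n := by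
  by_cases hn : n = 1
  · subst hn
    rw [pvBitsAlt, pvRef]
    rw [show ((PySem.Int.bitLength ((1 : Nat) : Int) : Int)) - 2 = -1 by decide]
    rw [PySem.List.pyRange_neg_one_eq_nil (by omega)]
    simp
  · have h2 : 2 ≤ n := by omega
    have hk1 : 2 ≤ PySem.Int.bitLength (n : Int) := by
      by_contra hc
      have hlt := PySem.Int.lt_two_pow_bitLength (n : Int)
      rw [Int.natAbs_natCast] at hlt
      have hb : PySem.Int.bitLength (n : Int) ≤ 1 := by omega
      have hle : 2 ^ PySem.Int.bitLength (n : Int) ≤ 2 ^ 1 :=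
        Nat.pow_le_pow_right (by omega) hb
      omega
    set b := PySem.Int.bitLength (n : Int) with hbdef
    rw [pvBitsAlt, pvRef_eq_map n h1, ← hbdef]
    rw [PySem.List.pyRange_neg_one]
    have hlen : (((b : Int) - 2) - (-1)).toNat = b - 1 := by omega
    rw [hlen, List.map_map]
    apply List.map_congr_left
    intro j hj
    have hj' : j < b - 1 := List.mem_range.mp hj
    simp only [Function.comp]
    have htoNat : (((b : Int) - 2) - (j : Int)).toNat = b - 2 - j := by omega
    rw [htoNat, Int.shiftRight_natCast, PySem.Int.band_one]
    exact_mod_cast PySem.Int.mod_natCast (n >>> (b - 2 - j)) 2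

theorem pvPadA_eq_bitsAlt (x : Int) (h1 : 1 ≤ x) (h2 : x ≤ 2147483648) :
    pvPadA x = pvBitsAlt x := by
  obtain ⟨n, rfl⟩ : ∃ n : Nat, x = (n : Int) := ⟨x.toNat, by omega⟩
  have hn1 : 0 < n := by exact_mod_cast h1
  have hn2 : n < 2 ^ 64 := by
    have : (n : Int) ≤ 2147483648 := h2
    have : n ≤ 2147483648 := by exact_mod_cast this
    omega
  rw [pvPadA]
  have hmod : PySem.Int.mod (n : Int) 2 = ((n % 2 : Nat) : Int) := PySem.Int.mod_natCast n 2
  rw [hmod, pvLoopA_spec 64 n hn1 hn2]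
  rw [List.singleton_append]
  rw [pvPad_eq_ref n hn1, pvBitsAlt_eq_ref n hn1]

-- ===== VERDICT (by name: the statement is the Claim_ definition above) =====
theorem generate_factors_spec : Claim_equal_generate_factors := by
  intro h_ w hdom hpre
  obtain ⟨hh, hw⟩ := hpre
  have hdom' : h_ ≤ 2147483648 ∧ w ≤ 2147483648 := by
    unfold Dom_generate_factors pvDomInt at hdom
    simp at hdom
    omega
  unfold Spec_generate_factors generate_factors generate_factors_alt
  rw [pvPadA_eq_bitsAlt h_ hh hdom'.1, pvPadA_eq_bitsAlt w hw hdom'.2]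
  set px := pvBitsAlt w
  set py := pvBitsAlt h_
  by_cases hxy : px.length > py.length
  · have h1 : max px.length py.length = px.length := by omega
    simp only [hxy, if_pos, gt_iff_lt, h1]
    have h2 : ¬ (py.length > px.length) := by omega
    simp [h2]
  · have h1 : max px.length py.length = py.length := by omega
    have h2 : ¬ (px.length > py.length) := hxy
    by_cases h3 : py.length > px.length
    · simp [h2, h3, h1]
    · have h4 : px.length = py.length := by omega
      simp [h4]
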